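-- pv_equiv track=rewrite | github.com/linqs/dickens-arxiv24 | path_finding/scripts/create_data.py | create_path_targets
-- ===== SOURCE A (Python) =====
-- from itertools import product
--
-- def create_path_targets(maps, config, map_start_id=0):
--     path_targets = []
--     for map_id in range(len(maps)):
--         for x in range(config["dimension"]):
--             for y in range(config["dimension"]):
--                 for dx, dy in product([-1, 0, 1], repeat=2):
--                     new_x = x + dx
--                     new_y = y + dy
--                     if ((new_x < 0)
--                             or (new_x >= config["dimension"])
--                             or (new_y < 0)
--                             or (new_y >= config["dimension"])
--                             or (dx == 0 and dy == 0)):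
--                         continue
--                     path_targets.append([map_id + map_start_id, x, y, new_x, new_y])
--
--         path_targets.append([map_id + map_start_id, config["dimension"], config["dimension"], 0, 0])
--         path_targets.append([map_id + map_start_id, 0, 0, config["dimension"], config["dimension"]])
--         path_targets.append([map_id + map_start_id, config["dimension"], config["dimension"], config["dimension"] - 1, config["dimension"] - 1])
--         path_targets.append([map_id + map_start_id, config["dimension"] - 1, config["dimension"] - 1, config["dimension"], config["dimension"]])
--
--     return path_targets
-- ===== SOURCE B (Python) =====
-- def create_path_targets(maps, config, map_start_id=0):
--     if not maps:
--         return []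
--     d = config["dimension"]
--     # delta-major sweep: each of the 8 moves scans its whole valid rectangle at once,
--     # then a single sort restores the cell-major emission order of the spec
--     moves = []
--     for dx in (-1, 0, 1):
--         for dy in (-1, 0, 1):
--             if dx == 0 and dy == 0:
--                 continue
--             for x in range(max(0, -dx), min(d, d - dx)):
--                 for y in range(max(0, -dy), min(d, d - dy)):
--                     moves.append([x, y, x + dx, y + dy])
--     moves.sort()
--     moves += [[d, d, 0, 0], [0, 0, d, d], [d, d, d - 1, d - 1], [d - 1, d - 1, d, d]]
--     out = []
--     for map_id in range(len(maps)):
--         for row in moves: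
--             out.append([map_id + map_start_id] + row)
--     return out
-- ===== Notes on version B (the rewrite author's own statement) =====
-- stated objective: alternative
-- what changed: B generates moves delta-major: each of the 8 directions sweeps its entire valid rectangle in one unguarded pass (no per-cell boundary test, no product-with-continue), then one sort restores the cell-major order, the four sentinels are appended, and the block is replicated across map ids; A instead scans cell-major and filters 9 deltas per cell per map.
import Mathlib
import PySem

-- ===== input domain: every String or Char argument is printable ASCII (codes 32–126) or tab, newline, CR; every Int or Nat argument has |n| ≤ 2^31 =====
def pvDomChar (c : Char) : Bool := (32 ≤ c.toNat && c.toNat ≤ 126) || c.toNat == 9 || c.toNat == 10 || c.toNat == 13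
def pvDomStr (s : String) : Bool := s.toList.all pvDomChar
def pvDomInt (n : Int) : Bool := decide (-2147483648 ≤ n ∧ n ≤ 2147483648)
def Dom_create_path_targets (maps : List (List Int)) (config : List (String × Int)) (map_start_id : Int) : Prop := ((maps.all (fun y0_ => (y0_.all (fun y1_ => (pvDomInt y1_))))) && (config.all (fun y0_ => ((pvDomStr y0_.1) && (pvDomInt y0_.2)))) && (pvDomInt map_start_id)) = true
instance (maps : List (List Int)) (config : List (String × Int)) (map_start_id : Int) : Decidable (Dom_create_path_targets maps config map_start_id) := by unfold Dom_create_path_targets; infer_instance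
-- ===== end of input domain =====

-- B generates the moves delta-major — each of the 8 directions sweeps its whole valid
-- rectangle in one unguarded pass — then one sort restores the cell-major order, the four
-- sentinels are appended and the block is replicated across map ids; A scans cell-major
-- and filters 9 deltas per cell per map.

-- ===== PORT A =====
-- config["dimension"]: first-match lookup in the association list; the `.getD 0` default is
-- only reached when the loop body never runs (maps = []) or outside Pre_ (KeyError in Python).
def create_path_targets (maps : List (List Int)) (config : List (String × Int)) (map_start_id : Int) : List (List Int) :=
  let dim := (config.lookup "dimension").getD 0
  -- the literal pair list is product([-1, 0, 1], repeat=2) in its iteration order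
  (PySem.List.pyRange 0 (maps.length : Int) 1).foldl (fun path_targets map_id =>
    let path_targets :=
      (PySem.List.pyRange 0 dim 1).foldl (fun path_targets x =>
        (PySem.List.pyRange 0 dim 1).foldl (fun path_targets y =>
          ([(-1, -1), (-1, 0), (-1, 1), (0, -1), (0, 0), (0, 1), (1, -1), (1, 0), (1, 1)] :
              List (Int × Int)).foldl (fun path_targets dxy =>
            let new_x := x + dxy.1
            let new_y := y + dxy.2
            if new_x < 0 ∨ new_x ≥ dim ∨ new_y < 0 ∨ new_y ≥ dim ∨ (dxy.1 = 0 ∧ dxy.2 = 0) then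
              path_targets
            else
              path_targets ++ [[map_id + map_start_id, x, y, new_x, new_y]]) path_targets) path_targets) path_targets
    path_targets
      ++ [[map_id + map_start_id, dim, dim, 0, 0]]
      ++ [[map_id + map_start_id, 0, 0, dim, dim]]
      ++ [[map_id + map_start_id, dim, dim, dim - 1, dim - 1]]
      ++ [[map_id + map_start_id, dim - 1, dim - 1, dim, dim]]) []

-- ===== PORT B =====
def create_path_targets_alt (maps : List (List Int)) (config : List (String × Int)) (map_start_id : Int) : List (List Int) :=
  if maps = [] then []
  else
    let d := (config.lookup "dimension").getD 0  -- KeyError outside Pre_; Pre_ guarantees the key here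
    -- delta-major sweep: for each non-zero (dx, dy), all sources x ∈ [max(0,-dx), min(d,d-dx)),
    -- y ∈ [max(0,-dy), min(d,d-dy)) are valid, with no per-cell boundary test
    let moves :=
      ([-1, 0, 1] : List Int).foldl (fun moves dx =>
        ([-1, 0, 1] : List Int).foldl (fun moves dy =>
          if dx = 0 ∧ dy = 0 then moves
          else
            (PySem.List.pyRange (max 0 (-dx)) (min d (d - dx)) 1).foldl (fun moves x =>
              (PySem.List.pyRange (max 0 (-dy)) (min d (d - dy)) 1).foldl (fun moves y =>
                moves ++ [[x, y, x + dx, y + dy]]) moves) moves) moves) []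
    -- moves.sort(): Python's list-of-lists sort is lexicographic
    let moves := PySem.List.sorted moves (fun r => r) false
    let moves := moves ++ [[d, d, 0, 0], [0, 0, d, d], [d, d, d - 1, d - 1], [d - 1, d - 1, d, d]]
    (PySem.List.pyRange 0 (maps.length : Int) 1).foldl (fun out map_id =>
      moves.foldl (fun out row => out ++ [(map_id + map_start_id) :: row]) out) []

-- ===== PRECONDITION & SPEC =====
-- Pre_ excludes exactly the inputs where Python A raises KeyError: maps nonempty and config
-- lacking a "dimension" key (on empty maps A never reaches the lookup and returns []).
def Pre_create_path_targets (maps : List (List Int)) (config : List (String × Int)) (map_start_id : Int) : Prop :=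
  maps = [] ∨ (config.lookup "dimension").isSome = true
instance (maps : List (List Int)) (config : List (String × Int)) (map_start_id : Int) : Decidable (Pre_create_path_targets maps config map_start_id) := by unfold Pre_create_path_targets; infer_instance
def pvWitness_create_path_targets : List (List Int) × (List (String × Int)) × Int := ([[1, 2], [3]], [("dimension", 2)], 5)

def Spec_create_path_targets (maps : List (List Int)) (config : List (String × Int)) (map_start_id : Int) (out : List (List Int)) : Prop := out = create_path_targets_alt maps config map_start_id
instance (maps : List (List Int)) (config : List (String × Int)) (map_start_id : Int) (out : List (List Int)) : Decidable (Spec_create_path_targets maps config map_start_id out) := by unfold Spec_create_path_targets; infer_instance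

-- ===== CLAIM (what is proved, stated in full; the proofs are below) =====
def Claim_equal_create_path_targets : Prop := ∀ (maps : List (List Int)) (config : List (String × Int)) (map_start_id : Int), Dom_create_path_targets maps config map_start_id → Pre_create_path_targets maps config map_start_id → Spec_create_path_targets maps config map_start_id (create_path_targets maps config map_start_id)

-- ===== LEMMAS AND PROOFS =====

-- Python's lexicographic `<` on 4-element int lists, by its constructors
theorem pv_lt4 (a b c e a' b' c' e' : Int)
    (h : a < a' ∨ (a = a' ∧ (b < b' ∨ (b = b' ∧ (c < c' ∨ (c = c' ∧ e < e')))))) :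
    List.Lex (· < ·) ([a, b, c, e] : List Int) [a', b', c', e'] := by
  rcases h with h | ⟨h1, h⟩
  · exact .rel h
  subst h1
  rcases h with h | ⟨h2, h⟩
  · exact .cons (.rel h)
  subst h2
  rcases h with h | ⟨h3, h⟩
  · exact .cons (.cons (.rel h))
  subst h3
  exact .cons (.cons (.cons (.rel h)))

-- the 9 deltas of product([-1,0,1], repeat=2), in iteration order
def pvDq : List (Int × Int) :=
  [(-1, -1), (-1, 0), (-1, 1), (0, -1), (0, 0), (0, 1), (1, -1), (1, 0), (1, 1)]

-- the (at most one) row that cell (x,y) and delta q contribute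
def pvF (d x y : Int) (q : Int × Int) : List (List Int) :=
  if -q.1 ≤ x ∧ x < d - q.1 ∧ -q.2 ≤ y ∧ y < d - q.2 ∧ ¬(q.1 = 0 ∧ q.2 = 0)
  then [[x, y, x + q.1, y + q.2]] else []

-- the per-map cell rows in A's (cell-major) emission order
def pvCells (d : Int) : List (List Int) :=
  (PySem.List.pyRange 0 d 1).flatMap fun x =>
    (PySem.List.pyRange 0 d 1).flatMap fun y => pvDq.flatMap (pvF d x y)

theorem pv_mem_F {d x y : Int} {q : Int × Int} {r : List Int} (h : r ∈ pvF d x y q) :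
    r = [x, y, x + q.1, y + q.2] ∧
      (-q.1 ≤ x ∧ x < d - q.1 ∧ -q.2 ≤ y ∧ y < d - q.2 ∧ ¬(q.1 = 0 ∧ q.2 = 0)) := by
  unfold pvF at h
  split_ifs at h with hc
  · simp only [List.mem_singleton] at h
    exact ⟨h, hc⟩
  · simp at h

theorem pv_flatMap_ite {α β : Type} (l : List α) (p : α → Prop) [DecidablePred p] (g : α → β) :
    (l.flatMap fun a => if p a then [g a] else []) = (l.filter (fun a => decide (p a))).map g := by
  induction l with
  | nil => rfl
  | cons a t ih => by_cases h : p a <;> simp [h, ih]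

theorem pv_filter_flatMap {α β : Type} (l : List α) (p : α → Bool) (f : α → List β) :
    (l.filter p).flatMap f = l.flatMap (fun a => if p a then f a else []) := by
  induction l with
  | nil => rfl
  | cons a t ih => by_cases h : p a = true <;> simp [h, ih]

-- filtering a range by an interval is the clamped range
theorem pv_filter_pyRange_aux (n : Nat) : ∀ (a b lo hi : Int), (b - a).toNat ≤ n →
    (PySem.List.pyRange a b 1).filter (fun x => decide (lo ≤ x ∧ x < hi)) =
      PySem.List.pyRange (max a lo) (min b hi) 1 := by
  induction n with
  | zero =>
    intro a b lo hi h
    rw [PySem.List.pyRange_one_eq_nil (by omega), PySem.List.pyRange_one_eq_nil (by omega)]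
    rfl
  | succ n ih =>
    intro a b lo hi h
    by_cases hab : b ≤ a
    · rw [PySem.List.pyRange_one_eq_nil hab, PySem.List.pyRange_one_eq_nil (by omega)]; rfl
    · push_neg at hab
      rw [PySem.List.pyRange_one_cons hab, List.filter_cons, ih (a + 1) b lo hi (by omega)]
      by_cases hin : lo ≤ a ∧ a < hi
      · rw [if_pos (by simpa using hin)]
        rw [show max (a + 1) lo = a + 1 by omega, show max a lo = a by omega]
        exact (PySem.List.pyRange_one_cons (show a < min b hi by omega)).symm
      · rw [if_neg (by simpa using hin)]
        by_cases hlo : a < lo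
        · congr 1; omega
        · rw [PySem.List.pyRange_one_eq_nil (by omega), PySem.List.pyRange_one_eq_nil (by omega)]

theorem pv_filter_pyRange (a b lo hi : Int) :
    (PySem.List.pyRange a b 1).filter (fun x => decide (lo ≤ x ∧ x < hi)) =
      PySem.List.pyRange (max a lo) (min b hi) 1 :=
  pv_filter_pyRange_aux (b - a).toNat a b lo hi le_rfl

-- ---------- A-side reduction ----------

-- A's 9-delta conditional appends at one cell produce the pvF rows with the map id prepended
theorem pv_Acell (d x y m : Int) (acc : List (List Int)) :
    (pvDq.foldl (fun path_targets dxy =>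
        if x + dxy.1 < 0 ∨ x + dxy.1 ≥ d ∨ y + dxy.2 < 0 ∨ y + dxy.2 ≥ d ∨ (dxy.1 = 0 ∧ dxy.2 = 0) then
          path_targets
        else
          path_targets ++ [[m, x, y, x + dxy.1, y + dxy.2]]) acc) =
      acc ++ (pvDq.flatMap (pvF d x y)).map (fun row => m :: row) := by
  rw [PySem.List.foldl_congr_mem _ _
      (fun pt (dxy : Int × Int) =>
        if ¬(x + dxy.1 < 0 ∨ x + dxy.1 ≥ d ∨ y + dxy.2 < 0 ∨ y + dxy.2 ≥ d ∨ (dxy.1 = 0 ∧ dxy.2 = 0)) then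
          pt ++ [[m, x, y, x + dxy.1, y + dxy.2]] else pt)
      _ (by intro acc2 dxy _; exact (ite_not _ _ _).symm),
    PySem.List.foldl_append_ite]
  congr 1
  rw [List.map_flatMap]
  have : ∀ q : Int × Int,
      (pvF d x y q).map (fun row => m :: row) =
        if -q.1 ≤ x ∧ x < d - q.1 ∧ -q.2 ≤ y ∧ y < d - q.2 ∧ ¬(q.1 = 0 ∧ q.2 = 0)
        then [[m, x, y, x + q.1, y + q.2]] else [] := by
    intro q; unfold pvF; split_ifs <;> rfl
  simp only [this]
  rw [pv_flatMap_ite, List.filter_congr]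
  intro q _
  simp only [decide_eq_decide]
  omega

-- A's per-map double scan appends pvCells with the map id prepended
theorem pv_Ablock (d m : Int) (acc : List (List Int)) :
    (PySem.List.pyRange 0 d 1).foldl (fun pt x =>
      (PySem.List.pyRange 0 d 1).foldl (fun pt y =>
        (([(-1, -1), (-1, 0), (-1, 1), (0, -1), (0, 0), (0, 1), (1, -1), (1, 0), (1, 1)] :
            List (Int × Int))).foldl (fun pt dxy =>
          if x + dxy.1 < 0 ∨ x + dxy.1 ≥ d ∨ y + dxy.2 < 0 ∨ y + dxy.2 ≥ d ∨ (dxy.1 = 0 ∧ dxy.2 = 0) then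
            pt
          else
            pt ++ [[m, x, y, x + dxy.1, y + dxy.2]]) pt) pt) acc
      = acc ++ (pvCells d).map (fun row => m :: row) := by
  have hy : ∀ (x : Int) (acc2 : List (List Int)),
      (PySem.List.pyRange 0 d 1).foldl (fun pt y =>
        (([(-1, -1), (-1, 0), (-1, 1), (0, -1), (0, 0), (0, 1), (1, -1), (1, 0), (1, 1)] :
            List (Int × Int))).foldl (fun pt dxy =>
          if x + dxy.1 < 0 ∨ x + dxy.1 ≥ d ∨ y + dxy.2 < 0 ∨ y + dxy.2 ≥ d ∨ (dxy.1 = 0 ∧ dxy.2 = 0) then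
            pt
          else
            pt ++ [[m, x, y, x + dxy.1, y + dxy.2]]) pt) acc2
        = acc2 ++ ((PySem.List.pyRange 0 d 1).flatMap fun y => pvDq.flatMap (pvF d x y)).map
            (fun row => m :: row) := by
    intro x acc2
    rw [PySem.List.foldl_congr_mem _ _
        (fun pt y => pt ++ (pvDq.flatMap (pvF d x y)).map (fun row => m :: row)) _
        (by intro acc3 y _; exact pv_Acell d x y m acc3),
      PySem.List.foldl_append_eq_flatMap, List.map_flatMap]
  rw [PySem.List.foldl_congr_mem _ _ _ _ (fun acc2 x _ => hy x acc2),
    PySem.List.foldl_append_eq_flatMap, pvCells, List.map_flatMap]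

-- ---------- B-side reduction ----------

-- one delta's rectangle sweep, written over the full range with pvF
theorem pv_Bdelta (d dx dy : Int) :
    (if dx = 0 ∧ dy = 0 then ([] : List (List Int))
     else (PySem.List.pyRange (max 0 (-dx)) (min d (d - dx)) 1).flatMap fun x =>
       (PySem.List.pyRange (max 0 (-dy)) (min d (d - dy)) 1).map fun y => [x, y, x + dx, y + dy])
      = (PySem.List.pyRange 0 d 1).flatMap fun x =>
          (PySem.List.pyRange 0 d 1).flatMap fun y => pvF d x y (dx, dy) := by
  by_cases hc : dx = 0 ∧ dy = 0
  · rw [if_pos hc]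
    symm
    rw [List.flatMap_eq_nil_iff]
    intro x _
    rw [List.flatMap_eq_nil_iff]
    intro y _
    unfold pvF
    rw [if_neg (by simp [hc.1, hc.2])]
  · rw [if_neg hc, ← pv_filter_pyRange 0 d (-dx) (d - dx), ← pv_filter_pyRange 0 d (-dy) (d - dy),
      pv_filter_flatMap]
    apply List.flatMap_congr
    intro x _
    by_cases hpx : -dx ≤ x ∧ x < d - dx
    · rw [if_pos (by simpa using hpx)]
      have : ∀ y, pvF d x y (dx, dy) = if -dy ≤ y ∧ y < d - dy then [[x, y, x + dx, y + dy]] else [] := by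
        intro y; unfold pvF; dsimp only; split_ifs <;> first | rfl | tauto
      simp only [this]
      rw [pv_flatMap_ite]
    · rw [if_neg (by simpa using hpx)]
      symm
      rw [List.flatMap_eq_nil_iff]
      intro y _
      unfold pvF
      dsimp only
      rw [if_neg (by tauto)]

-- anything double-flatMapped over [-1,0,1] × [-1,0,1] is flatMapped over pvDq
theorem pv_Dq_flatMap {β : Type} (g : Int × Int → List β) :
    (([-1, 0, 1] : List Int).flatMap fun dx => ([-1, 0, 1] : List Int).flatMap fun dy => g (dx, dy))
      = pvDq.flatMap g := by
  simp [pvDq, List.flatMap]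

-- B's unsorted delta-major moves list
theorem pv_Bmoves (d : Int) :
    (([-1, 0, 1] : List Int).foldl (fun moves dx =>
      ([-1, 0, 1] : List Int).foldl (fun moves dy =>
        if dx = 0 ∧ dy = 0 then moves
        else
          (PySem.List.pyRange (max 0 (-dx)) (min d (d - dx)) 1).foldl (fun moves x =>
            (PySem.List.pyRange (max 0 (-dy)) (min d (d - dy)) 1).foldl (fun moves y =>
              moves ++ [[x, y, x + dx, y + dy]]) moves) moves) moves) [])
      = pvDq.flatMap fun q =>
          (PySem.List.pyRange 0 d 1).flatMap fun x =>
            (PySem.List.pyRange 0 d 1).flatMap fun y => pvF d x y q := by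
  have hxy : ∀ (dx dy : Int) (acc : List (List Int)),
      (PySem.List.pyRange (max 0 (-dx)) (min d (d - dx)) 1).foldl (fun moves x =>
        (PySem.List.pyRange (max 0 (-dy)) (min d (d - dy)) 1).foldl (fun moves y =>
          moves ++ [[x, y, x + dx, y + dy]]) moves) acc
      = acc ++ ((PySem.List.pyRange (max 0 (-dx)) (min d (d - dx)) 1).flatMap fun x =>
          (PySem.List.pyRange (max 0 (-dy)) (min d (d - dy)) 1).map fun y => [x, y, x + dx, y + dy]) := by
    intro dx dy acc
    rw [PySem.List.foldl_congr_mem _ _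
        (fun moves x => moves ++ ((PySem.List.pyRange (max 0 (-dy)) (min d (d - dy)) 1).map
          fun y => [x, y, x + dx, y + dy])) _
        (by intro acc2 x _; dsimp only; exact PySem.List.foldl_append_singleton_eq_map _ _ _),
      PySem.List.foldl_append_eq_flatMap]
  have hdy : ∀ (dx : Int) (acc : List (List Int)),
      (([-1, 0, 1] : List Int).foldl (fun moves dy =>
        if dx = 0 ∧ dy = 0 then moves
        else
          (PySem.List.pyRange (max 0 (-dx)) (min d (d - dx)) 1).foldl (fun moves x =>
            (PySem.List.pyRange (max 0 (-dy)) (min d (d - dy)) 1).foldl (fun moves y =>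
              moves ++ [[x, y, x + dx, y + dy]]) moves) moves) acc)
      = acc ++ (([-1, 0, 1] : List Int).flatMap fun dy =>
          (PySem.List.pyRange 0 d 1).flatMap fun x =>
            (PySem.List.pyRange 0 d 1).flatMap fun y => pvF d x y (dx, dy)) := by
    intro dx acc
    rw [PySem.List.foldl_congr_mem _ _
        (fun moves dy => moves ++
          ((PySem.List.pyRange 0 d 1).flatMap fun x =>
            (PySem.List.pyRange 0 d 1).flatMap fun y => pvF d x y (dx, dy))) _
        (by
          intro acc2 dy _
          dsimp only
          by_cases hc : dx = 0 ∧ dy = 0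
          · rw [if_pos hc, ← pv_Bdelta d dx dy, if_pos hc, List.append_nil]
          · rw [if_neg hc, hxy dx dy acc2, ← pv_Bdelta d dx dy, if_neg hc]),
      PySem.List.foldl_append_eq_flatMap]
  rw [PySem.List.foldl_congr_mem _ _ _ _ (fun acc dx _ => hdy dx acc),
    PySem.List.foldl_append_eq_flatMap, List.nil_append, ← pv_Dq_flatMap]

-- ---------- permutation ----------

theorem pv_flatMap_comm {α β γ : Type} (l₁ : List α) (l₂ : List β) (f : α → β → List γ) :
    (l₁.flatMap fun a => l₂.flatMap fun b => f a b).Perm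
      (l₂.flatMap fun b => l₁.flatMap fun a => f a b) := by
  induction l₁ with
  | nil => simp
  | cons a t ih =>
    simp only [List.flatMap_cons]
    exact (ih.append_left _).trans (List.flatMap_append_perm l₂ (f a) _)

theorem pv_perm_flatMap_congr {α β : Type} (l : List α) (f g : α → List β)
    (h : ∀ a ∈ l, (f a).Perm (g a)) : (l.flatMap f).Perm (l.flatMap g) := by
  induction l with
  | nil => simp
  | cons a t ih =>
    simp only [List.flatMap_cons]
    exact (h a (by simp)).append (ih fun a ha => h a (by simp [ha]))

-- A's cell-major rows are a permutation of B's delta-major rows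
theorem pv_cells_perm (d : Int) :
    (pvCells d).Perm (pvDq.flatMap fun q =>
      (PySem.List.pyRange 0 d 1).flatMap fun x =>
        (PySem.List.pyRange 0 d 1).flatMap fun y => pvF d x y q) := by
  unfold pvCells
  refine (pv_perm_flatMap_congr _ _ _ (fun x _ => ?_)).trans
    (pv_flatMap_comm (PySem.List.pyRange 0 d 1) pvDq
      (fun x q => (PySem.List.pyRange 0 d 1).flatMap fun y => pvF d x y q))
  exact pv_flatMap_comm (PySem.List.pyRange 0 d 1) pvDq (fun y q => pvF d x y q)

-- ---------- strict sortedness of pvCells ----------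

theorem pv_F_lt (d x y : Int) (q q' : Int × Int) (h : q.1 < q'.1 ∨ (q.1 = q'.1 ∧ q.2 < q'.2)) :
    ∀ r ∈ pvF d x y q, ∀ r' ∈ pvF d x y q', List.Lex (· < ·) r r' := by
  intro r hr r' hr'
  obtain ⟨rfl, _⟩ := pv_mem_F hr
  obtain ⟨rfl, _⟩ := pv_mem_F hr'
  apply pv_lt4
  rcases h with h | ⟨h, h2⟩
  · exact Or.inr ⟨rfl, Or.inr ⟨rfl, Or.inl (by omega)⟩⟩
  · exact Or.inr ⟨rfl, Or.inr ⟨rfl, Or.inr ⟨by omega, by omega⟩⟩⟩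

theorem pv_pairwise_cell (d x y : Int) : (pvDq.flatMap (pvF d x y)).Pairwise (fun a b => List.Lex (· < ·) a b) := by
  rw [List.pairwise_flatMap]
  constructor
  · intro q _
    unfold pvF
    split_ifs <;> simp
  · have hlex : pvDq.Pairwise (fun q q' => q.1 < q'.1 ∨ (q.1 = q'.1 ∧ q.2 < q'.2)) := by decide
    exact hlex.imp (fun h => pv_F_lt d x y _ _ h)

theorem pv_pairwise_cells (d : Int) : (pvCells d).Pairwise (fun a b => List.Lex (· < ·) a b) := by
  unfold pvCells
  rw [List.pairwise_flatMap]
  constructor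
  · intro x _
    rw [List.pairwise_flatMap]
    refine ⟨fun y _ => pv_pairwise_cell d x y, ?_⟩
    refine (PySem.List.pairwise_lt_pyRange_one 0 d).imp ?_
    intro y y' hyy r hr r' hr'
    rw [List.mem_flatMap] at hr hr'
    obtain ⟨q, _, hq⟩ := hr
    obtain ⟨q', _, hq'⟩ := hr'
    obtain ⟨rfl, _⟩ := pv_mem_F hq
    obtain ⟨rfl, _⟩ := pv_mem_F hq'
    exact pv_lt4 _ _ _ _ _ _ _ _ (Or.inr ⟨rfl, Or.inl hyy⟩)
  · refine (PySem.List.pairwise_lt_pyRange_one 0 d).imp ?_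
    intro x x' hxx r hr r' hr'
    rw [List.mem_flatMap] at hr hr'
    obtain ⟨y, _, hy⟩ := hr
    obtain ⟨y', _, hy'⟩ := hr'
    rw [List.mem_flatMap] at hy hy'
    obtain ⟨q, _, hq⟩ := hy
    obtain ⟨q', _, hq'⟩ := hy'
    obtain ⟨rfl, _⟩ := pv_mem_F hq
    obtain ⟨rfl, _⟩ := pv_mem_F hq'
    exact pv_lt4 _ _ _ _ _ _ _ _ (Or.inl hxx)

-- PySem.List.sorted is determined by the order relation: two instance bundles whose
-- `<` agree sort identically
theorem pv_sorted_congr {α κ : Type} (i1 i2 : LT κ) (dl1 : @DecidableLT κ i1)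
    (dl2 : @DecidableLT κ i2) (h : ∀ a b, @LT.lt κ i1 a b ↔ @LT.lt κ i2 a b)
    (xs : List α) (key : α → κ) :
    @PySem.List.sorted α κ i1 dl1 xs key false = @PySem.List.sorted α κ i2 dl2 xs key false := by
  rw [@PySem.List.sorted_eq_foldl_insertBy α κ i1 dl1 xs key,
    @PySem.List.sorted_eq_foldl_insertBy α κ i2 dl2 xs key]
  congr 1
  funext acc x
  congr 1
  funext a b
  simp only [decide_eq_decide]
  exact h _ _

-- sorting B's delta-major moves yields A's cell-major order
theorem pv_sorted_moves (d : Int) :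
    PySem.List.sorted (pvDq.flatMap fun q =>
        (PySem.List.pyRange 0 d 1).flatMap fun x =>
          (PySem.List.pyRange 0 d 1).flatMap fun y => pvF d x y q) (fun r => r) false
      = pvCells d := by
  have h := PySem.List.sorted_eq_of_perm_of_pairwise_lt
    (pvDq.flatMap fun q =>
      (PySem.List.pyRange 0 d 1).flatMap fun x =>
        (PySem.List.pyRange 0 d 1).flatMap fun y => pvF d x y q)
    (pvCells d) (fun r => r) (pv_cells_perm d) ((pv_pairwise_cells d).imp (fun h => h))
  exact Eq.trans (pv_sorted_congr _ _ _ _ (fun a b => Iff.rfl) _ (fun r => r)) h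

-- ---------- equivalence ----------

theorem create_path_targets_eq (maps : List (List Int)) (config : List (String × Int)) (map_start_id : Int) :
    create_path_targets maps config map_start_id = create_path_targets_alt maps config map_start_id := by
  by_cases hm : maps = []
  · subst hm; rfl
  · simp only [create_path_targets, create_path_targets_alt, hm, if_false]
    generalize (config.lookup "dimension").getD 0 = d
    rw [pv_Bmoves d, pv_sorted_moves d]
    have hA : ∀ (acc : List (List Int)), ∀ mi ∈ PySem.List.pyRange 0 (maps.length : Int) 1,
        (((PySem.List.pyRange 0 d 1).foldl (fun pt x =>
          (PySem.List.pyRange 0 d 1).foldl (fun pt y =>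
            (([(-1, -1), (-1, 0), (-1, 1), (0, -1), (0, 0), (0, 1), (1, -1), (1, 0), (1, 1)] :
                List (Int × Int))).foldl (fun pt dxy =>
              if x + dxy.1 < 0 ∨ x + dxy.1 ≥ d ∨ y + dxy.2 < 0 ∨ y + dxy.2 ≥ d ∨ (dxy.1 = 0 ∧ dxy.2 = 0) then
                pt
              else
                pt ++ [[mi + map_start_id, x, y, x + dxy.1, y + dxy.2]]) pt) pt) acc)
          ++ [[mi + map_start_id, d, d, 0, 0]]
          ++ [[mi + map_start_id, 0, 0, d, d]]
          ++ [[mi + map_start_id, d, d, d - 1, d - 1]]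
          ++ [[mi + map_start_id, d - 1, d - 1, d, d]])
        = acc ++ ((pvCells d
            ++ [[d, d, 0, 0], [0, 0, d, d], [d, d, d - 1, d - 1], [d - 1, d - 1, d, d]]).map
              (fun row => (mi + map_start_id) :: row)) := by
      intro acc mi _
      rw [pv_Ablock d (mi + map_start_id) acc]
      simp [List.append_assoc]
    have hB : ∀ (acc : List (List Int)), ∀ mi ∈ PySem.List.pyRange 0 (maps.length : Int) 1,
        ((pvCells d ++ [[d, d, 0, 0], [0, 0, d, d], [d, d, d - 1, d - 1], [d - 1, d - 1, d, d]]).foldl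
          (fun out row => out ++ [(mi + map_start_id) :: row]) acc)
        = acc ++ ((pvCells d
            ++ [[d, d, 0, 0], [0, 0, d, d], [d, d, d - 1, d - 1], [d - 1, d - 1, d, d]]).map
              (fun row => (mi + map_start_id) :: row)) := by
      intro acc mi _
      exact PySem.List.foldl_append_singleton_eq_map _ _ _
    rw [PySem.List.foldl_congr_mem _ _ _ _ hA, PySem.List.foldl_congr_mem _ _ _ _ hB]

-- ===== VERDICT (by name: the statement is the Claim_ definition above) =====
theorem create_path_targets_spec : Claim_equal_create_path_targets := by
  intro maps config map_start_id _ _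
  exact create_path_targets_eq maps config map_start_id
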